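-- pv_equiv track=rewrite | github.com/sjmeis/DPMLM | DPMLM.py | nth_rem
-- ===== SOURCE A (Python) =====
-- def nth_rem(s, sub, n):
--     s_split = s.split()
--     i = 0
--     try:
--         find = s_split.index(sub)
--         i += 1
--     except ValueError:
--         return s
--
--     while i != n:
--         try:
--             find = s_split.index(sub, find + 1)
--             i += 1
--         except ValueError:
--             break
--     if i == n:
--         return " ".join(s_split[:find] + s_split[find+1:])
--     return s
-- ===== SOURCE B (Python) =====
-- def nth_rem(s, sub, n):
--     toks = s.split()
--     matches = [i for i, tok in enumerate(toks) if tok == sub]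
--     if 1 <= n <= len(matches):
--         k = matches[n - 1]
--         return " ".join(toks[:k] + toks[k + 1:])
--     return s
-- ===== Notes on version B (the rewrite author's own statement) =====
-- stated objective: simpler
-- what changed: B builds the list of all positions of sub among the whitespace tokens in one enumerate pass and removes the (n-1)-th one by index, replacing A's try/except loop of resumed list.index scans and its manual occurrence counter.
import Mathlib
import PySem

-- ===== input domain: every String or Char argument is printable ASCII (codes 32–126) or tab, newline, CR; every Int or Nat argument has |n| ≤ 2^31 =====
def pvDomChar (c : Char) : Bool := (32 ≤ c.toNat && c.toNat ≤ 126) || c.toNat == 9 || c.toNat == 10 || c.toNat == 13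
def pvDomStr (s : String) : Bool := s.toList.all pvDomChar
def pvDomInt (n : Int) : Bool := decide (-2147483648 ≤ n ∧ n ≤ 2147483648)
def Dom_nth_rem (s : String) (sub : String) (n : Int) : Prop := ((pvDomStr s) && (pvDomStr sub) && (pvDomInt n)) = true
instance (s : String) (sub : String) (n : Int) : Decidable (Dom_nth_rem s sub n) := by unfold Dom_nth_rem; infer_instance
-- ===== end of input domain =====

-- B replaces A's try/except loop of resumed list.index scans with one pass that
-- collects all match positions, then removes the (n-1)-th one; objective: simpler.

-- ===== PORT A =====
-- A's while loop: `find = s_split.index(sub, find+1)` is exact as find+1 plus the first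
-- index of sub in the dropped suffix (start = find+1 ≥ 0 always here).
def nth_rem_loop (toks : List String) (sub : String) (n : Int) (i : Int) (find : Nat) :
    Int × Nat :=
  if i = n then (i, find)
  else
    match h : PySem.List.index? (toks.drop (find + 1)) sub with
    | none => (i, find)
    | some j => nth_rem_loop toks sub n (i + 1) (find + 1 + j)
termination_by toks.length - find
decreasing_by
  obtain ⟨hk, -, -⟩ := PySem.List.getElem_of_index?_eq_some h
  simp only [List.length_drop] at hk
  omega

def nth_rem (s : String) (sub : String) (n : Int) : String :=
  let s_split := PySem.Str.split₀ s
  match PySem.List.index? s_split sub with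
  | none => s
  | some find0 =>
    let r := nth_rem_loop s_split sub n 1 find0
    if r.1 = n then
      PySem.Str.join " "
        (PySem.List.slice s_split none (some (r.2 : Int)) ++
         PySem.List.slice s_split (some ((r.2 : Int) + 1)) none)
    else s

-- ===== PORT B =====
def nth_rem_alt (s : String) (sub : String) (n : Int) : String :=
  let toks := PySem.Str.split₀ s
  let hits := (PySem.List.enumerate toks 0).filterMap
    (fun p => if p.2 = sub then some p.1 else none)
  if 1 ≤ n ∧ n ≤ PySem.List.len hits then
    let k := PySem.List.pyGetD hits (n - 1) 0  -- in range under the guard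
    PySem.Str.join " "
      (PySem.List.slice toks none (some k) ++
       PySem.List.slice toks (some (k + 1)) none)
  else s

-- ===== PRECONDITION & SPEC =====
def Spec_nth_rem (s : String) (sub : String) (n : Int) (out : String) : Prop := out = nth_rem_alt s sub n
instance (s : String) (sub : String) (n : Int) (out : String) : Decidable (Spec_nth_rem s sub n out) := by unfold Spec_nth_rem; infer_instance

-- ===== CLAIM (what is proved, stated in full; the proofs are below) =====
def Claim_equal_nth_rem : Prop := ∀ (s : String) (sub : String) (n : Int), Dom_nth_rem s sub n → Spec_nth_rem s sub n (nth_rem s sub n)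

-- ===== LEMMAS AND PROOFS =====

/-- Proof helper: positions (from offset `t`) of `sub` in `xs`. -/
def matchIdx (sub : String) : List String → Nat → List Nat
  | [], _ => []
  | x :: xs, t => if x = sub then t :: matchIdx sub xs (t + 1) else matchIdx sub xs (t + 1)

theorem matchIdx_of_index?_none (sub : String) (xs : List String) (t : Nat)
    (h : PySem.List.index? xs sub = none) : matchIdx sub xs t = [] := by
  induction xs generalizing t with
  | nil => rfl
  | cons x xs ih =>
    rw [PySem.List.index?_eq_none_iff] at h
    simp only [List.mem_cons, not_or] at h
    rw [matchIdx, if_neg (fun hx => h.1 hx.symm)]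
    exact ih (t + 1) (by rw [PySem.List.index?_eq_none_iff]; exact h.2)

theorem matchIdx_of_index?_some (sub : String) (xs : List String) (t j : Nat)
    (h : PySem.List.index? xs sub = some j) :
    matchIdx sub xs t = (t + j) :: matchIdx sub (xs.drop (j + 1)) (t + j + 1) := by
  induction xs generalizing t j with
  | nil => simp [PySem.List.index?] at h
  | cons x xs ih =>
    by_cases hx : x = sub
    · subst hx
      rw [PySem.List.index?_cons_self] at h
      obtain rfl : j = 0 := by simpa using h.symm
      simp [matchIdx]
    · rw [PySem.List.index?_cons_of_ne xs hx] at h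
      match hj : PySem.List.index? xs sub with
      | none => rw [hj] at h; simp at h
      | some j' =>
        rw [hj] at h
        obtain rfl : j = j' + 1 := by simpa using h.symm
        rw [matchIdx, if_neg hx, ih (t + 1) j' hj, List.drop_succ_cons]
        congr 1
        · omega
        · congr 1
          omega

theorem filterMap_enumerate_eq_matchIdx (sub : String) (xs : List String) (t : Nat) :
    (PySem.List.enumerate xs (t : Int)).filterMap
        (fun p => if p.2 = sub then some p.1 else none)
      = List.map (Nat.cast : Nat → Int) (matchIdx sub xs t) := by
  induction xs generalizing t with
  | nil => simp [PySem.List.enumerate_nil, matchIdx]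
  | cons x xs ih =>
    rw [PySem.List.enumerate_cons, matchIdx]
    have hcast : (t : Int) + 1 = ((t + 1 : Nat) : Int) := by push_cast; ring
    rw [List.filterMap_cons, hcast, ih (t + 1)]
    by_cases hx : x = sub
    · simp [hx]
    · simp [hx]

/-- Characterisation of A's while loop in terms of the remaining match positions. -/
theorem nth_rem_loop_spec (toks : List String) (sub : String) :
    ∀ (n i : Int) (find : Nat),
    nth_rem_loop toks sub n i find =
      (if i ≤ n ∧ n ≤ i + ((matchIdx sub (toks.drop (find + 1)) (find + 1)).length : Int)
       then (n, (find :: matchIdx sub (toks.drop (find + 1)) (find + 1)).getD (n - i).toNat 0)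
       else (i + ((matchIdx sub (toks.drop (find + 1)) (find + 1)).length : Int),
             (find :: matchIdx sub (toks.drop (find + 1)) (find + 1)).getLastD 0)) := by
  intro n i find
  induction i, find using nth_rem_loop.induct toks sub n with
  | case1 find =>
    rw [nth_rem_loop, if_pos rfl, if_pos (by constructor <;> omega)]
    simp
  | case2 i find hin h =>
    rw [nth_rem_loop, if_neg hin, h]
    change (i, find) = _
    rw [matchIdx_of_index?_none sub _ (find + 1) h]
    rw [if_neg (by simp only [List.length_nil, Nat.cast_zero]; omega)]
    simp
  | case3 i find hin j h ih =>
    rw [nth_rem_loop, if_neg hin, h]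
    change nth_rem_loop toks sub n (i + 1) (find + 1 + j) = _
    have hd : (toks.drop (find + 1)).drop (j + 1) = toks.drop (find + 1 + j + 1) := by
      rw [List.drop_drop]
      rfl
    rw [ih, matchIdx_of_index?_some sub _ (find + 1) j h, hd]
    simp only [List.length_cons]
    by_cases hc : i + 1 ≤ n ∧
        n ≤ i + 1 + ((matchIdx sub (toks.drop (find + 1 + j + 1)) (find + 1 + j + 1)).length : Int)
    · rw [if_pos hc, if_pos (by push_cast at hc ⊢; omega)]
      have h1 : (n - i).toNat = (n - (i + 1)).toNat + 1 := by omega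
      rw [h1]
      simp
    · rw [if_neg hc, if_neg (by push_cast at hc ⊢; omega)]
      simp only [Prod.mk.injEq, List.getLastD_cons]
      constructor
      · push_cast
        ring
      · trivial

theorem nth_rem_spec_aux (s sub : String) (n : Int) :
    nth_rem s sub n = nth_rem_alt s sub n := by
  unfold nth_rem nth_rem_alt
  have hE := filterMap_enumerate_eq_matchIdx sub (PySem.Str.split₀ s) 0
  simp only [Nat.cast_zero] at hE
  simp only [hE, PySem.List.len_eq, List.length_map]
  rcases hidx : PySem.List.index? (PySem.Str.split₀ s) sub with _ | f0
  · rw [matchIdx_of_index?_none sub _ 0 hidx]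
    simp only [List.map_nil, List.length_nil, Nat.cast_zero]
    rw [if_neg (by omega)]
  · have hM : matchIdx sub (PySem.Str.split₀ s) 0
        = f0 :: matchIdx sub ((PySem.Str.split₀ s).drop (f0 + 1)) (f0 + 1) := by
      simpa using matchIdx_of_index?_some sub _ 0 f0 hidx
    set R := matchIdx sub ((PySem.Str.split₀ s).drop (f0 + 1)) (f0 + 1) with hR
    simp only [hM, nth_rem_loop_spec (PySem.Str.split₀ s) sub n 1 f0, ← hR, List.length_cons]
    by_cases hc : 1 ≤ n ∧ n ≤ 1 + (R.length : Int)
    · rw [if_pos hc]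
      have hfst : ((n, (f0 :: R).getD (n - 1).toNat 0) : Int × Nat).1 = n := rfl
      rw [if_pos hfst]
      have hlt : (n - 1).toNat < (f0 :: R).length := by
        simp only [List.length_cons]
        omega
      have hk : PySem.List.pyGetD (List.map (Nat.cast : Nat → Int) (f0 :: R)) (n - 1) 0
          = (((f0 :: R).getD (n - 1).toNat 0 : Nat) : Int) := by
        have hn1 : (n - 1) = (((n - 1).toNat : Nat) : Int) := by omega
        conv_lhs => rw [hn1]
        rw [PySem.List.pyGetD_natCast, List.getD_eq_getElem?_getD, List.getElem?_map,
            List.getD_eq_getElem?_getD, List.getElem?_eq_getElem hlt]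
        rfl
      rw [hk, if_pos (by omega)]
    · rw [if_neg hc]
      rw [show ((1 + (R.length : Int), (f0 :: R).getLastD 0) : Int × Nat).1
            = 1 + (R.length : Int) from rfl]
      rw [if_neg (show ¬(1 + (R.length : Int)) = n by omega)]
      rw [if_neg (by omega)]

-- ===== VERDICT (by name: the statement is the Claim_ definition above) =====
theorem nth_rem_spec : Claim_equal_nth_rem := by
  intro s sub n _
  unfold Spec_nth_rem
  exact nth_rem_spec_aux s sub n
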